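-- pv_equiv track=rewrite | github.com/xiaotianluo0613/master-thesis | scripts/evaluate_n_to_n_sliding_maxpool.py | sliding_windows_words
-- ===== SOURCE A (Python) =====
-- from typing import Dict, List, Tuple
--
-- def sliding_windows_words(text: str, window_words: int, stride_words: int) -> List[str]:
--     words = text.split()
--     if not words:
--         return []
--     if len(words) <= window_words:
--         return [' '.join(words)]
--
--     windows = []
--     i = 0
--     while i < len(words):
--         chunk = words[i:i + window_words]
--         if not chunk:
--             break
--         windows.append(' '.join(chunk))
--         if i + window_words >= len(words):
--             break
--         i += stride_words
--     return windows
-- ===== SOURCE B (Python) =====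
-- def sliding_windows_words(text: str, window_words: int, stride_words: int):
--     def go(ws):
--         window = ' '.join(ws[:window_words])
--         if window_words < len(ws) and stride_words < len(ws):
--             return [window] + go(ws[stride_words:])
--         return [window]
--
--     words = text.split()
--     return go(words) if words else []
-- ===== Notes on version B (the rewrite author's own statement) =====
-- stated objective: alternative
-- what changed: B replaces A's index-stepping while-loop with breaks by structural recursion on the word-list suffix: emit the window at the front, recurse on the suffix after dropping one stride while the window has not reached the end and the next start is in range; Pre_ excludes nonpositive stride once the loop is reached (A loops forever) and nonpositive window sizes, whose negative-slice windows in A are accidental.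
-- outside the precondition, e.g. on sliding_windows_words('a b', 0, 1): A returns [], B returns ['', '']; on sliding_windows_words('a b c', -1, 1): A returns ['a b'], B returns ['a b', 'b', '']
import Mathlib
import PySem

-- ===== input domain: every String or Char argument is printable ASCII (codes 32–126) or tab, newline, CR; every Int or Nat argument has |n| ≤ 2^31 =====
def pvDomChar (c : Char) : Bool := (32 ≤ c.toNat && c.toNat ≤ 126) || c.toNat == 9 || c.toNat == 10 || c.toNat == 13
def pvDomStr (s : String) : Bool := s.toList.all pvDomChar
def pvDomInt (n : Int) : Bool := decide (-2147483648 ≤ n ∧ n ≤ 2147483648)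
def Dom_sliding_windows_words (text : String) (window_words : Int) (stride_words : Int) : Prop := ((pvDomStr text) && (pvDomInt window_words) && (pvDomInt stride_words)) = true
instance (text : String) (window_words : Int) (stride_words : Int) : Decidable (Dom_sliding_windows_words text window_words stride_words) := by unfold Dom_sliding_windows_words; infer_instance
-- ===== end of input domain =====

-- B replaces A's index-stepping while-loop with breaks by structural recursion on the
-- word-list suffix (objective: alternative decomposition; same asymptotic cost).


-- ===== PORT A =====
-- A's while-loop; fuel = words.length + 1 bounds the iteration count (i starts at 0 and
-- grows by stride ≥ 1 inside Pre_, so at most words.length iterations happen).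
def aLoopSW (words : List String) (window stride : Int) : Nat → Int → List String → List String
  | 0, _, acc => acc.reverse
  | fuel+1, i, acc =>
    if i < (words.length : Int) then
      let chunk := PySem.List.slice words (some i) (some (i + window))
      if chunk = [] then acc.reverse
      else
        let acc' := PySem.Str.join " " chunk :: acc
        if (words.length : Int) ≤ i + window then acc'.reverse
        else aLoopSW words window stride fuel (i + stride) acc'
    else acc.reverse

def sliding_windows_words (text : String) (window_words : Int) (stride_words : Int) : List String :=
  let words := PySem.Str.split₀ text
  if words = [] then []
  else if (words.length : Int) ≤ window_words then [PySem.Str.join " " words]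
  else aLoopSW words window_words stride_words (words.length + 1) 0 []

-- ===== PORT B =====
-- B's recursion on the suffix; fuel = the word count bounds the recursion depth
-- (each recursive call drops stride ≥ 1 words inside Pre_).
def bGoSW (window stride : Int) : Nat → List String → List String
  | 0, _ => []
  | fuel+1, ws =>
    let w := PySem.Str.join " " (PySem.List.slice ws none (some window))
    if window < (ws.length : Int) ∧ stride < (ws.length : Int) then
      w :: bGoSW window stride fuel (PySem.List.slice ws (some stride) none)
    else [w]

def sliding_windows_words_alt (text : String) (window_words : Int) (stride_words : Int) : List String :=
  let words := PySem.Str.split₀ text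
  if words = [] then []
  else bGoSW window_words stride_words words.length words

-- ===== PRECONDITION & SPEC =====
-- Pre_ keeps the natural domain: positive window and stride once the loop is reached
-- (A loops forever for stride ≤ 0 there, and a nonpositive window is outside the task's
-- natural domain — A's empty/negative slices there are accidental); texts whose word
-- count fits in one window (or is zero) are kept for every window/stride.
def Pre_sliding_windows_words (text : String) (window_words : Int) (stride_words : Int) : Prop :=
  PySem.Str.split₀ text = [] ∨
  ((PySem.Str.split₀ text).length : Int) ≤ window_words ∨
  (1 ≤ window_words ∧ 1 ≤ stride_words)
instance (text : String) (window_words : Int) (stride_words : Int) : Decidable (Pre_sliding_windows_words text window_words stride_words) := by unfold Pre_sliding_windows_words; infer_instance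

def pvWitness_sliding_windows_words : String × Int × Int := ("a bb c dd e", 3, 2)

def Spec_sliding_windows_words (text : String) (window_words : Int) (stride_words : Int) (out : List String) : Prop := out = sliding_windows_words_alt text window_words stride_words
instance (text : String) (window_words : Int) (stride_words : Int) (out : List String) : Decidable (Spec_sliding_windows_words text window_words stride_words out) := by unfold Spec_sliding_windows_words; infer_instance

-- ===== CLAIM (what is proved, stated in full; the proofs are below) =====
def Claim_equal_sliding_windows_words : Prop := ∀ (text : String) (window_words : Int) (stride_words : Int), Dom_sliding_windows_words text window_words stride_words → Pre_sliding_windows_words text window_words stride_words → Spec_sliding_windows_words text window_words stride_words (sliding_windows_words text window_words stride_words)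

-- ===== LEMMAS AND PROOFS =====

theorem pvWitness_ok : Dom_sliding_windows_words (pvWitness_sliding_windows_words.1) (pvWitness_sliding_windows_words.2.1) (pvWitness_sliding_windows_words.2.2) ∧ Pre_sliding_windows_words (pvWitness_sliding_windows_words.1) (pvWitness_sliding_windows_words.2.1) (pvWitness_sliding_windows_words.2.2) := by decide

theorem chunk_ne_nil_sw (words : List String) (w i : Int) (hw : 0 < w) (h0 : 0 ≤ i)
    (hin : i < (words.length : Int)) :
    PySem.List.slice words (some i) (some (i + w)) ≠ [] := by
  rw [PySem.List.slice_toNat words h0 (by omega)]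
  intro h
  have hl := congrArg List.length h
  simp only [List.length_take, List.length_drop, List.length_nil] at hl
  omega

-- A's chunk at index i is B's front window of the suffix words.drop i
theorem chunk_eq_front (words : List String) (w i : Int) (h0 : 0 ≤ i) (hw : 0 ≤ w) :
    PySem.List.slice words (some i) (some (i + w)) =
      PySem.List.slice (words.drop i.toNat) none (some w) := by
  rw [PySem.List.slice_toNat words h0 (by omega), PySem.List.slice_to _ hw]
  congr 1
  omega

-- the main induction: A's loop from index i equals B's recursion on the suffix
theorem loop_eq_go (words : List String) (w s : Int) (hw : 1 ≤ w) (hs : 1 ≤ s) :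
    ∀ (fuelA fuelB : Nat) (i : Int) (acc : List String), 0 ≤ i → i < (words.length : Int) →
      ((words.length : Int) - i).toNat < fuelA →
      ((words.length : Int) - i).toNat ≤ fuelB →
      aLoopSW words w s fuelA i acc =
        acc.reverse ++ bGoSW w s fuelB (words.drop i.toNat) := by
  intro fuelA
  induction fuelA with
  | zero => intro fuelB i acc h0 hin hfa _; omega
  | succ fa ih =>
    intro fuelB i acc h0 hin hfa hfb
    have hlen : ((words.drop i.toNat).length : Int) = (words.length : Int) - i := by
      simp [List.length_drop]; omega
    obtain ⟨fb, rfl⟩ : ∃ fb, fuelB = fb + 1 := ⟨fuelB - 1, by omega⟩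
    have hch := chunk_ne_nil_sw words w i (by omega) h0 hin
    have hwin := chunk_eq_front words w i h0 (by omega)
    by_cases hbr : (words.length : Int) ≤ i + w
    · -- window reaches the end: both stop after emitting it
      have hA : aLoopSW words w s (fa+1) i acc =
          (PySem.Str.join " " (PySem.List.slice words (some i) (some (i + w))) :: acc).reverse := by
        unfold aLoopSW; rw [if_pos hin, if_neg hch, if_pos hbr]
      have hB : bGoSW w s (fb+1) (words.drop i.toNat) =
          [PySem.Str.join " " (PySem.List.slice (words.drop i.toNat) none (some w))] := by
        unfold bGoSW; rw [if_neg (by omega)]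
      rw [hA, hB, hwin]; simp
    · by_cases hst : (words.length : Int) ≤ i + s
      · -- next start past the end: A exits at the next loop head, B stops now
        have hA : aLoopSW words w s (fa+1) i acc =
            aLoopSW words w s fa (i + s)
              (PySem.Str.join " " (PySem.List.slice words (some i) (some (i + w))) :: acc) := by
          unfold aLoopSW; rw [if_pos hin, if_neg hch, if_neg hbr]; cases fa <;> rfl
        have hA2 : aLoopSW words w s fa (i + s)
            (PySem.Str.join " " (PySem.List.slice words (some i) (some (i + w))) :: acc) =
            (PySem.Str.join " " (PySem.List.slice words (some i) (some (i + w))) :: acc).reverse := by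
          cases fa with
          | zero => rfl
          | succ fa' => unfold aLoopSW; rw [if_neg (by omega)]
        have hB : bGoSW w s (fb+1) (words.drop i.toNat) =
            [PySem.Str.join " " (PySem.List.slice (words.drop i.toNat) none (some w))] := by
          unfold bGoSW; rw [if_neg (by omega)]
        rw [hA, hA2, hB, hwin]; simp
      · -- both continue on the suffix one stride later
        have hA : aLoopSW words w s (fa+1) i acc =
            aLoopSW words w s fa (i + s)
              (PySem.Str.join " " (PySem.List.slice words (some i) (some (i + w))) :: acc) := by
          unfold aLoopSW; rw [if_pos hin, if_neg hch, if_neg hbr]; cases fa <;> rfl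
        have hdrop : PySem.List.slice (words.drop i.toNat) (some s) none = words.drop (i + s).toNat := by
          rw [PySem.List.slice_from _ (by omega), List.drop_drop]
          congr 1; omega
        have hB : bGoSW w s (fb+1) (words.drop i.toNat) =
            PySem.Str.join " " (PySem.List.slice (words.drop i.toNat) none (some w)) ::
              bGoSW w s fb (words.drop (i + s).toNat) := by
          unfold bGoSW; rw [if_pos (by constructor <;> omega), hdrop]
          cases fb <;> rfl
        rw [hA, hB, hwin,
            ih fb (i + s) _ (by omega) (by omega) (by omega) (by omega)]
        simp

-- ===== VERDICT (by name: the statement is the Claim_ definition above) =====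
theorem sliding_windows_words_spec : Claim_equal_sliding_windows_words := by
  intro text w s _ hpre
  unfold Spec_sliding_windows_words sliding_windows_words sliding_windows_words_alt
  by_cases hnil : PySem.Str.split₀ text = []
  · simp [hnil]
  · have hlen1 : 1 ≤ (PySem.Str.split₀ text).length := by
      cases h : PySem.Str.split₀ text with
      | nil => exact absurd h hnil
      | cons a l => simp
    by_cases hnw : ((PySem.Str.split₀ text).length : Int) ≤ w
    · -- all words fit in one window: B emits it without recursing
      obtain ⟨m, hm⟩ : ∃ m, (PySem.Str.split₀ text).length = m + 1 := ⟨(PySem.Str.split₀ text).length - 1, by omega⟩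
      have hB : bGoSW w s (PySem.Str.split₀ text).length (PySem.Str.split₀ text) =
          [PySem.Str.join " " (PySem.List.slice (PySem.Str.split₀ text) none (some w))] := by
        rw [hm]; unfold bGoSW; rw [if_neg (by push Not; intro hc; omega)]
      have htake : PySem.List.slice (PySem.Str.split₀ text) none (some w) = PySem.Str.split₀ text := by
        rw [PySem.List.slice_to _ (by omega), List.take_of_length_le (by omega)]
      simp only [hnil, if_false, hnw, if_true, hB, htake]
    · rcases hpre with h | h | ⟨hw, hs⟩
      · exact absurd h hnil
      · exact absurd h hnw
      · simp only [hnil, hnw, if_false]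
        have := loop_eq_go (PySem.Str.split₀ text) w s hw hs
          ((PySem.Str.split₀ text).length + 1) (PySem.Str.split₀ text).length 0 []
          le_rfl (by omega) (by omega) (by omega)
        simpa using this
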